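-- pv_equiv track=rewrite | github.com/ENOCHAKINPELU/Malicious_Detection | app.py | symbol
-- ===== SOURCE A (Python) =====
-- def symbol(url):
--     con = []
--     features = ['@','?','-','=','.','#','%','+','$','!','*',',','//']
--     count = 0
--     for i in features:
--         count= url.count(i)
--         con.append(count)
--     return con
-- ===== SOURCE B (Python) =====
-- def symbol(url):
--     # single pass over url: a state machine tallying the 12 single-char features
--     # and counting non-overlapping '//' with a run flag; no str.count calls
--     counts = {f: 0 for f in '@?-=.#%+$!*,'}
--     slashes = 0
--     run = False
--     for ch in url:
--         if ch in counts:
--             counts[ch] += 1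
--         if ch == '/':
--             if run:
--                 slashes += 1
--                 run = False
--             else:
--                 run = True
--         else:
--             run = False
--     return [counts[f] for f in '@?-=.#%+$!*,'] + [slashes]
-- ===== Notes on version B (the rewrite author's own statement) =====
-- stated objective: alternative
-- what changed: B is a single pass over the url: a state machine that tallies the twelve single-character features and counts the non-overlapping double-slash pattern with a run flag, making no str.count calls, instead of A's thirteen separate full-string url.count scans.
import Mathlib
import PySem

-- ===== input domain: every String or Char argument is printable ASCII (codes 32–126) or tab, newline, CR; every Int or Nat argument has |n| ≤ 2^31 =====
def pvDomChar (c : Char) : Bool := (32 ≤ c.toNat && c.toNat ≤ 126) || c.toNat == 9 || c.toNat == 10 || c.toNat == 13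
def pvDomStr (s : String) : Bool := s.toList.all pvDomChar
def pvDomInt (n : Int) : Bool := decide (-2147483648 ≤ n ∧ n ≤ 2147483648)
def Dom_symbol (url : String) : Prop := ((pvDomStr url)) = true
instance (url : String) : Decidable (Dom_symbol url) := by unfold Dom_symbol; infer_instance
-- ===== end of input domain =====

-- B replaces A's thirteen full-string url.count scans by a single pass over the url:
-- a state machine tallying the twelve single-character features and counting
-- non-overlapping '//' with a run flag; objective: alternative (different algorithm).


-- ===== PORT A =====
-- literal transliteration: loop over the feature list, count = url.count(i), append to con
def symbol (url : String) : List Int :=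
  let features : List String := ["@", "?", "-", "=", ".", "#", "%", "+", "$", "!", "*", ",", "//"]
  let st := features.foldl
    (fun (st : List Int × Int) i =>
      let count : Int := (PySem.Str.count url i : Int)
      (st.1 ++ [count], count))
    ([], 0)
  st.1

-- ===== PORT B =====
-- loop body of Source B: guarded dict tally, then the '/'-run update of (slashes, run)
def pyB_step (st : PySem.Dict Char Int × Int × Bool) (ch : Char) :
    PySem.Dict Char Int × Int × Bool :=
  let counts := if st.1.contains ch then st.1.insert ch (st.1.getD ch 0 + 1) else st.1
  let sr : Int × Bool :=
    if ch = '/' then (if st.2.2 then (st.2.1 + 1, false) else (st.2.1, true))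
    else (st.2.1, false)
  (counts, sr)

-- literal transliteration of Source B: dict preinitialised to 0, one pass, then extraction
-- (counts[f] cannot raise: every f was inserted at initialisation, so getD is exact)
-- port of the initialising dict comprehension {f: 0 for f in '@?-=.#%+$!*,'}
def initCounts : PySem.Dict Char Int :=
  ['@','?','-','=','.','#','%','+','$','!','*',','].foldl (fun d f => d.insert f 0) PySem.Dict.empty

def symbol_alt (url : String) : List Int :=
  let st := url.toList.foldl pyB_step (initCounts, 0, false)
  (['@','?','-','=','.','#','%','+','$','!','*',','].map (fun f => st.1.getD f 0)) ++ [st.2.1]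

-- ===== PRECONDITION & SPEC =====
def Spec_symbol (url : String) (out : List Int) : Prop := out = symbol_alt url
instance (url : String) (out : List Int) : Decidable (Spec_symbol url out) := by
  unfold Spec_symbol; infer_instance

-- ===== CLAIM =====
def Claim_equal_symbol : Prop := ∀ (url : String), Dom_symbol url → Spec_symbol url (symbol url)

-- ===== LEMMAS AND PROOFS =====

-- the two components of pyB_step, separately
def stepD (d : PySem.Dict Char Int) (ch : Char) : PySem.Dict Char Int :=
  if d.contains ch then d.insert ch (d.getD ch 0 + 1) else d

def stepSR (sr : Int × Bool) (ch : Char) : Int × Bool :=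
  if ch = '/' then (if sr.2 then (sr.1 + 1, false) else (sr.1, true)) else (sr.1, false)

theorem foldl_step_split (l : List Char) : ∀ (d : PySem.Dict Char Int) (s : Int) (r : Bool),
    l.foldl pyB_step (d, s, r) = (l.foldl stepD d, l.foldl stepSR (s, r)) := by
  induction l with
  | nil => intro d s r; rfl
  | cons c t ih =>
    intro d s r
    have h : pyB_step (d, s, r) c = (stepD d c, stepSR (s, r) c) := rfl
    simp only [List.foldl_cons, h]
    exact ih _ _ _

-- the tally loop: a key present in the dict ends with its count added
theorem get?_foldl_stepD (f : Char) : ∀ (l : List Char) (d : PySem.Dict Char Int) (v : Int),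
    d.get? f = some v → (l.foldl stepD d).get? f = some (v + l.count f) := by
  intro l
  induction l with
  | nil => intro d v h; simpa using h
  | cons c t ih =>
    intro d v h
    by_cases hc : c = f
    · subst hc
      have hcont : d.contains c = true := by
        rw [PySem.Dict.contains_eq_isSome_get?, h]; rfl
      have hgetD : d.getD c 0 = v := PySem.Dict.getD_of_get?_eq_some d 0 h
      have hstep : stepD d c = d.insert c (v + 1) := by
        simp [stepD, hcont, hgetD]
      have h' : (d.insert c (v + 1)).get? c = some (v + 1) :=
        PySem.Dict.get?_insert_self d c (v + 1)
      simp only [List.foldl_cons, hstep]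
      rw [ih _ _ h']
      simp
      ring
    · have hstep : (stepD d c).get? f = some v := by
        unfold stepD
        split
        · rw [PySem.Dict.get?_insert_of_ne _ _ (fun he => hc he.symm)]; exact h
        · exact h
      simp only [List.foldl_cons]
      rw [ih _ _ hstep]
      simp [hc]

-- number of non-overlapping '//' matches in l, given whether a '/' run is pending
def pend (r : Bool) : List Char → Nat
  | [] => 0
  | c :: t => if c = '/' then (if r then 1 + pend false t else pend true t) else pend false t

theorem foldl_stepSR_fst : ∀ (l : List Char) (s : Int) (r : Bool),
    (l.foldl stepSR (s, r)).1 = s + (pend r l : Int) := by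
  intro l
  induction l with
  | nil => intro s r; simp [pend]
  | cons c t ih =>
    intro s r
    by_cases hc : c = '/'
    · subst hc
      cases r with
      | true =>
        simp only [List.foldl_cons, stepSR]
        rw [ih]
        simp [pend]
        ring
      | false =>
        simp only [List.foldl_cons, stepSR]
        rw [ih]
        simp [pend]
    · simp only [List.foldl_cons, stepSR, if_neg hc]
      rw [ih]
      simp [pend, hc]

-- Python's non-overlapping count of '//' equals the run-flag state machine's count
theorem count_go_slash : ∀ (fuel : Nat) (l : List Char) (acc : Nat), l.length ≤ fuel →
    PySem.Chars.count.go ['/', '/'] fuel l acc = acc + pend false l := by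
  intro fuel
  induction fuel with
  | zero =>
    intro l acc h
    have : l = [] := List.eq_nil_of_length_eq_zero (Nat.le_zero.mp h)
    subst this; simp [PySem.Chars.count.go, pend]
  | succ f ih =>
    intro l acc h
    match l with
    | [] => simp [PySem.Chars.count.go, pend]
    | c :: t =>
      by_cases hpre : (['/', '/'] : List Char).isPrefixOf (c :: t)
      · obtain ⟨c2, t', hc, hc2, ht⟩ : ∃ c2 t', c = '/' ∧ c2 = '/' ∧ t = c2 :: t' := by
          match t, hpre with
          | [], hpre => simp [List.isPrefixOf] at hpre
          | c2 :: t', hpre =>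
            simp [List.isPrefixOf] at hpre
            exact ⟨c2, t', hpre.1.symm, hpre.2.symm, rfl⟩
        subst hc; subst ht; subst hc2
        have hlen : t'.length ≤ f := by simp at h; omega
        simp only [PySem.Chars.count.go, if_pos hpre]
        have hdrop : List.drop (['/', '/'] : List Char).length ('/' :: '/' :: t') = t' := rfl
        rw [hdrop, ih _ _ hlen]
        simp [pend]
        omega
      · have hlen : t.length ≤ f := by simp at h; omega
        simp only [PySem.Chars.count.go, if_neg hpre]
        rw [ih _ _ hlen]
        congr 1
        -- pend false (c :: t) = pend false t when '//' is not a prefix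
        match t with
        | [] =>
          by_cases hc : c = '/' <;> simp [pend, hc]
        | c2 :: t' =>
          have : ¬ (c = '/' ∧ c2 = '/') := by
            intro ⟨h1, h2⟩; exact hpre (by simp [List.isPrefixOf, h1, h2])
          by_cases hc : c = '/'
          · have hc2 : c2 ≠ '/' := fun h2 => this ⟨hc, h2⟩
            simp [pend, hc, hc2]
          · simp [pend, hc]

theorem chars_count_slash (s : List Char) :
    PySem.Chars.count s ['/', '/'] = pend false s := by
  unfold PySem.Chars.count
  simpa using count_go_slash s.length s 0 le_rfl

-- counting a single-character pattern with Python's str.count is List.count on the characters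
theorem count_go_single (c : Char) : ∀ (s : List Char) (fuel acc : Nat), s.length ≤ fuel →
    PySem.Chars.count.go [c] fuel s acc = acc + s.count c := by
  intro s
  induction s with
  | nil => intro fuel acc _; cases fuel <;> simp [PySem.Chars.count.go]
  | cons h t ih =>
    intro fuel acc hf
    cases fuel with
    | zero => simp at hf
    | succ f =>
      have hf' : t.length ≤ f := by simpa using hf
      by_cases hch : c = h
      · subst hch
        simp [PySem.Chars.count.go, List.isPrefixOf, ih _ _ hf']
        omega
      · simp [PySem.Chars.count.go, List.isPrefixOf, hch, ih _ _ hf', Ne.symm hch]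

theorem chars_count_single (s : List Char) (c : Char) :
    PySem.Chars.count s [c] = s.count c := by
  unfold PySem.Chars.count
  simpa using count_go_single c s s.length 0 le_rfl

-- final dict value for each feature key
theorem getD_final (url : String) (f : Char) (d : PySem.Dict Char Int)
    (h : d.get? f = some 0) :
    (url.toList.foldl stepD d).getD f 0 = (url.toList.count f : Int) := by
  rw [PySem.Dict.getD_of_get?_eq_some _ 0 (get?_foldl_stepD f url.toList d 0 h)]
  simp

-- ===== VERDICT =====
theorem symbol_spec : Claim_equal_symbol := by
  intro url _
  unfold Spec_symbol symbol symbol_alt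
  simp only [List.foldl_cons, List.foldl_nil, List.map_cons, List.map_nil]
  rw [foldl_step_split]
  simp only
  rw [foldl_stepSR_fst]
  rw [getD_final url '@' initCounts (by decide), getD_final url '?' initCounts (by decide),
      getD_final url '-' initCounts (by decide), getD_final url '=' initCounts (by decide),
      getD_final url '.' initCounts (by decide), getD_final url '#' initCounts (by decide),
      getD_final url '%' initCounts (by decide), getD_final url '+' initCounts (by decide),
      getD_final url '$' initCounts (by decide), getD_final url '!' initCounts (by decide),
      getD_final url '*' initCounts (by decide), getD_final url ',' initCounts (by decide)]
  simp [PySem.Str.count_eq, chars_count_single, chars_count_slash]
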